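-- pv_equiv track=rewrite | github.com/jfm-code/mi-codesignal | optimization_practice/word_shortest_path/main.py | solution
-- ===== SOURCE A (Python) =====
-- def solution(word_list):
--     last_occurence = {}
--     min_distance = {}
--     for i, word in enumerate(word_list):
--         if word in min_distance:
--             min_distance[word] = min(min_distance[word], i - last_occurence[word])
--         else:
--             min_distance[word] = float('inf')
--         last_occurence[word] = i
--
--     delete_items = []
--     for key, val in min_distance.items():
--         if val == float('inf'):
--             delete_items.append(key)
--
--     for k in delete_items:
--         del min_distance[k]
--
--     return min_distance
-- ===== SOURCE B (Python) =====
-- def solution(word_list):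
--     positions = {}
--     for i, word in enumerate(word_list):
--         positions.setdefault(word, []).append(i)
--     return {w: min(b - a for a, b in zip(idxs, idxs[1:]))
--             for w, idxs in positions.items() if len(idxs) >= 2}
-- ===== Notes on version B (the rewrite author's own statement) =====
-- stated objective: simpler
-- what changed: B builds a dict of all occurrence positions per word in one pass and then, in a separate comprehension, keeps only words with >=2 positions and takes the min of consecutive-index differences, replacing A's last-seen/running-min state with the float('inf') sentinel and the collect-then-delete cleanup loops.
import Mathlib
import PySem

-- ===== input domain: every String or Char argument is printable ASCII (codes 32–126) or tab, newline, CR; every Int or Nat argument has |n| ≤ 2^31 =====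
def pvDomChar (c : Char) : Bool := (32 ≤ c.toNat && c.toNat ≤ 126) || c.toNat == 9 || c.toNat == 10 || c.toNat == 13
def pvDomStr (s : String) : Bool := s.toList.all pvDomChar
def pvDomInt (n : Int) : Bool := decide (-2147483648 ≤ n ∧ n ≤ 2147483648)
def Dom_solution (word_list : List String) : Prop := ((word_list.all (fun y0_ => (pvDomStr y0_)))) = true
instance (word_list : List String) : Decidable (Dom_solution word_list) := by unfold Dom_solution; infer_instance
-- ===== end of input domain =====

-- B replaces A's last-seen-index / running-min-with-inf-sentinel state and its collect-then-delete
-- cleanup loops by a dict of full position lists plus a separate min-of-consecutive-gaps pass (simpler).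

-- ===== PORT A =====
-- float('inf') is modeled as `none : Option Int` (Python's min(inf, x) = x is the `none` match arm;
-- `val == float('inf')` in the cleanup loop is `kv.2 == none`); `last_occurence[word]` is read with
-- getD 0, exact because on that branch the key is always present.
def solution (word_list : List String) : List (String × Int) :=
  let st := (PySem.List.enumerate word_list 0).foldl
    (fun (st : PySem.Dict String Int × PySem.Dict String (Option Int)) p =>
      let mind :=
        if st.2.contains p.2 then
          st.2.insert p.2 (some (match st.2.getD p.2 none with
            | none => p.1 - st.1.getD p.2 0
            | some m => min m (p.1 - st.1.getD p.2 0)))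
        else st.2.insert p.2 none
      (st.1.insert p.2 p.1, mind))
    (PySem.Dict.empty, PySem.Dict.empty)
  let deleteItems := st.2.items.foldl
    (fun (acc : List String) kv => if kv.2 == none then acc ++ [kv.1] else acc) []
  let mind := deleteItems.foldl (fun d k => d.erase k) st.2
  mind.items.map (fun kv => (kv.1, kv.2.getD 0))

-- ===== PORT B =====
-- positions.setdefault(word, []).append(i)  =  modify with default [] appending i;
-- the dict comprehension over positions.items() is the filterMap.
def solution_alt (word_list : List String) : List (String × Int) :=
  let positions := (PySem.List.enumerate word_list 0).foldl
    (fun (d : PySem.Dict String (List Int)) p => d.modify p.2 [] (· ++ [p.1]))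
    PySem.Dict.empty
  positions.items.filterMap (fun kv =>
    if 2 ≤ kv.2.length then
      match (kv.2.zip kv.2.tail).map (fun q => q.2 - q.1) with
      | g :: gs => some (kv.1, gs.foldl min g)
      | [] => none
    else none)

-- ===== PRECONDITION & SPEC =====
def Spec_solution (word_list : List String) (out : List (String × Int)) : Prop := out = solution_alt word_list
instance (word_list : List String) (out : List (String × Int)) : Decidable (Spec_solution word_list out) := by unfold Spec_solution; infer_instance

-- ===== CLAIM (what is proved, stated in full; the proofs are below) =====
def Claim_equal_solution : Prop := ∀ (word_list : List String), Dom_solution word_list → Spec_solution word_list (solution word_list)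

-- ===== LEMMAS AND PROOFS =====

-- names for the two loop bodies, A's finalization, B's comprehension body, and the value abstractions
def stepA (st : PySem.Dict String Int × PySem.Dict String (Option Int)) (p : Int × String) :
    PySem.Dict String Int × PySem.Dict String (Option Int) :=
  let mind :=
    if st.2.contains p.2 then
      st.2.insert p.2 (some (match st.2.getD p.2 none with
        | none => p.1 - st.1.getD p.2 0
        | some m => min m (p.1 - st.1.getD p.2 0)))
    else st.2.insert p.2 none
  (st.1.insert p.2 p.1, mind)

def stepB (d : PySem.Dict String (List Int)) (p : Int × String) : PySem.Dict String (List Int) :=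
  d.modify p.2 [] (· ++ [p.1])

def finalA (d : PySem.Dict String (Option Int)) : List (String × Int) :=
  ((d.items.foldl
      (fun (acc : List String) kv => if kv.2 == none then acc ++ [kv.1] else acc) []).foldl
        (fun d k => d.erase k) d).items.map (fun kv => (kv.1, kv.2.getD 0))

def mapVal {ν ν' : Type} (d : PySem.Dict String ν) (f : ν → ν') : PySem.Dict String ν' :=
  PySem.Dict.mk (d.items.map (fun p => (p.1, f p.2)))

theorem get?_mapVal {ν ν' : Type} (d : PySem.Dict String ν) (f : ν → ν') (k : String) :
    (mapVal d f).get? k = (d.get? k).map f := by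
  obtain ⟨l⟩ := d
  induction l with
  | nil => rfl
  | cons p t ih =>
    simp only [mapVal, List.map_cons] at *
    rw [PySem.Dict.get?_mk_cons, PySem.Dict.get?_mk_cons]
    by_cases h : p.1 == k <;> simp [h, ih]

theorem contains_mapVal {ν ν' : Type} (d : PySem.Dict String ν) (f : ν → ν') (k : String) :
    (mapVal d f).contains k = d.contains k := by
  rw [PySem.Dict.contains_eq_isSome_get?, PySem.Dict.contains_eq_isSome_get?, get?_mapVal]
  simp

theorem insert_mapVal {ν ν' : Type} (d : PySem.Dict String ν) (f : ν → ν') (k : String) (v : ν) :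
    mapVal (d.insert k v) f = (mapVal d f).insert k (f v) := by
  apply PySem.Dict.ext
  by_cases h : d.contains k
  · rw [show (mapVal (d.insert k v) f).items = (d.insert k v).items.map (fun p => (p.1, f p.2)) from rfl,
      PySem.Dict.items_insert_of_contains _ _ h,
      PySem.Dict.items_insert_of_contains _ _ (by rw [contains_mapVal]; exact h)]
    show _ = (mapVal d f).items.map _
    rw [show (mapVal d f).items = d.items.map (fun p => (p.1, f p.2)) from rfl]
    simp only [List.map_map]
    apply List.map_congr_left
    intro p _
    by_cases hp : p.1 = k <;> simp [hp]
  · rw [show (mapVal (d.insert k v) f).items = (d.insert k v).items.map (fun p => (p.1, f p.2)) from rfl,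
      PySem.Dict.items_insert_of_not_contains _ _ (by simpa using h),
      PySem.Dict.items_insert_of_not_contains _ _ (by rw [contains_mapVal]; simpa using h)]
    simp [mapVal]

def lastD (l : List Int) : Int := l.getLastD 0
def gaps (l : List Int) : List Int := (l.zip l.tail).map (fun q => q.2 - q.1)
def gapsOpt (l : List Int) : Option Int :=
  match gaps l with
  | [] => none
  | g :: gs => some (gs.foldl min g)

theorem gaps_append (l : List Int) (h : l ≠ []) (i : Int) :
    gaps (l ++ [i]) = gaps l ++ [i - lastD l] := by
  induction l with
  | nil => simp at h
  | cons x t ih =>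
    cases t with
    | nil => simp [gaps, lastD]
    | cons y t' =>
      have hih := ih (by simp)
      simp only [gaps, lastD, List.cons_append, List.zip_cons_cons, List.tail_cons,
        List.map_cons] at *
      rw [hih]
      simp

theorem gapsOpt_append (l : List Int) (h : l ≠ []) (i : Int) :
    gapsOpt (l ++ [i]) = some (match gapsOpt l with
      | none => i - lastD l
      | some m => min m (i - lastD l)) := by
  cases hg : gaps l with
  | nil => simp [gapsOpt, gaps_append l h i, hg]
  | cons g gs => simp [gapsOpt, gaps_append l h i, hg, List.foldl_append]

theorem step_sim (P : PySem.Dict String (List Int)) (hne : ∀ v ∈ P.values, v ≠ [])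
    (p : Int × String) :
    stepA (mapVal P lastD, mapVal P gapsOpt) p
      = (mapVal (stepB P p) lastD, mapVal (stepB P p) gapsOpt) := by
  by_cases hc : P.contains p.2 = true
  · obtain ⟨old, hold⟩ : ∃ v, P.get? p.2 = some v := by
      rw [PySem.Dict.contains_eq_isSome_get?] at hc
      exact Option.isSome_iff_exists.mp hc
    have holdne : old ≠ [] := by
      apply hne
      have := PySem.Dict.mem_items_of_get?_eq_some P hold
      simp only [PySem.Dict.values]
      exact List.mem_map.mpr ⟨(p.2, old), this, rfl⟩
    have hgD : P.getD p.2 [] = old := PySem.Dict.getD_of_get?_eq_some P [] hold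
    have hlast : (mapVal P lastD).getD p.2 0 = lastD old := by
      rw [PySem.Dict.getD_eq_get?_getD, get?_mapVal, hold]; rfl
    have hmind : (mapVal P gapsOpt).getD p.2 none = gapsOpt old := by
      rw [PySem.Dict.getD_eq_get?_getD, get?_mapVal, hold]; rfl
    have hmod' : P.modify p.2 [] (· ++ [p.1]) = P.insert p.2 (old ++ [p.1]) := by
      rw [show P.modify p.2 [] (· ++ [p.1]) = P.insert p.2 (P.getD p.2 [] ++ [p.1]) from rfl, hgD]
    simp only [stepA, stepB, contains_mapVal, hc, if_pos, hlast, hmind, hmod', insert_mapVal]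
    rw [show lastD (old ++ [p.1]) = p.1 by simp [lastD], gapsOpt_append old holdne p.1]
  · have hgD : P.getD p.2 [] = [] := by
      apply PySem.Dict.getD_of_not_contains
      simpa using hc
    have hmod' : P.modify p.2 [] (· ++ [p.1]) = P.insert p.2 [p.1] := by
      rw [show P.modify p.2 [] (· ++ [p.1]) = P.insert p.2 (P.getD p.2 [] ++ [p.1]) from rfl, hgD,
        List.nil_append]
    simp only [stepA, stepB, contains_mapVal, hc, hmod', insert_mapVal]
    rfl

theorem values_ne_foldl (l : List (Int × String)) (P : PySem.Dict String (List Int))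
    (hne : ∀ v ∈ P.values, v ≠ []) :
    ∀ v ∈ (l.foldl stepB P).values, v ≠ [] := by
  induction l generalizing P with
  | nil => exact hne
  | cons p t ih =>
    rw [List.foldl_cons]
    apply ih
    intro v hv
    rcases PySem.Dict.mem_values_insert P p.2 (P.getD p.2 [] ++ [p.1]) v hv with h | h
    · simp [h]
    · exact hne v h

theorem loop_sim (l : List (Int × String)) (P : PySem.Dict String (List Int))
    (hne : ∀ v ∈ P.values, v ≠ []) :
    l.foldl stepA (mapVal P lastD, mapVal P gapsOpt)
      = (mapVal (l.foldl stepB P) lastD, mapVal (l.foldl stepB P) gapsOpt) := by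
  induction l generalizing P with
  | nil => rfl
  | cons p t ih =>
    rw [List.foldl_cons, List.foldl_cons, step_sim P hne p]
    exact ih (stepB P p) (values_ne_foldl [p] P hne)

theorem erase_foldl_items {ν : Type} (ks : List String) (d : PySem.Dict String ν) :
    (ks.foldl (fun d k => d.erase k) d).items = d.items.filter (fun p => decide (p.1 ∉ ks)) := by
  induction ks generalizing d with
  | nil => simp
  | cons k t ih =>
    rw [List.foldl_cons, ih]
    rw [show (d.erase k).items = d.items.filter (fun p => !(p.1 == k)) from rfl,
      List.filter_filter]
    apply List.filter_congr
    intro p _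
    by_cases h1 : p.1 = k <;> by_cases h2 : p.1 ∈ t <;> simp [h1, h2]

def bFun (kv : String × List Int) : Option (String × Int) :=
  if 2 ≤ kv.2.length then
    match (kv.2.zip kv.2.tail).map (fun q => q.2 - q.1) with
    | g :: gs => some (kv.1, gs.foldl min g)
    | [] => none
  else none

theorem elt_eq (p : String × List Int) :
    (if !(gapsOpt p.2 == none) then some (p.1, (gapsOpt p.2).getD 0) else none) = bFun p := by
  obtain ⟨k, l⟩ := p
  match l with
  | [] => rfl
  | [x] => rfl
  | x :: y :: t =>
    simp [bFun, gapsOpt, gaps]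

theorem map_filter_eq_filterMap {α β : Type} (q : α → Bool) (f : α → β) (l : List α) :
    (l.filter q).map f = l.filterMap (fun x => if q x then some (f x) else none) := by
  induction l with
  | nil => rfl
  | cons x t ih =>
    by_cases h : q x <;> simp [h, ih]

theorem final_eq (Q : PySem.Dict String (List Int)) (hnd : Q.keys.Nodup) :
    finalA (mapVal Q gapsOpt) = Q.items.filterMap bFun := by
  unfold finalA
  have hitems : (mapVal Q gapsOpt).items = Q.items.map (fun p => (p.1, gapsOpt p.2)) := rfl
  rw [PySem.List.foldl_append_if, erase_foldl_items, hitems,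
    List.nil_append]
  have hnd' : ((Q.items.map (fun p => (p.1, gapsOpt p.2))).map (·.1)).Nodup := by
    simpa [List.map_map] using hnd
  rw [List.filter_congr (l := Q.items.map (fun p => (p.1, gapsOpt p.2)))
    (q := fun kv => !(kv.2 == none)) ?_]
  · rw [List.filter_map, List.map_map, map_filter_eq_filterMap]
    apply List.filterMap_congr
    intro p _
    simpa using elt_eq p
  · intro kv hkv
    have hiff : kv.1 ∈ ((Q.items.map (fun p => (p.1, gapsOpt p.2))).filter
        (fun kv => kv.2 == none)).map (·.1) ↔ kv.2 = none := by
      constructor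
      · intro hmem
        obtain ⟨q, hq, hq1⟩ := List.mem_map.mp hmem
        have hqf := List.mem_filter.mp hq
        have := List.inj_on_of_nodup_map hnd' hqf.1 hkv hq1
        rw [← this]
        simpa using hqf.2
      · intro h2
        exact List.mem_map.mpr ⟨kv, List.mem_filter.mpr ⟨hkv, by simp [h2]⟩, rfl⟩
    beta_reduce
    cases h2 : kv.2 with
    | none =>
      simp only [beq_self_eq_true, Bool.not_true]
      exact decide_eq_false (not_not_intro (by simpa using hiff.mpr h2))
    | some v =>
      have hrhs : ((some v : Option Int) == none) = false := by simp
      rw [hrhs, Bool.not_false]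
      refine decide_eq_true (fun hm => ?_)
      rw [h2] at hiff
      exact Option.some_ne_none v (hiff.mp (by simpa using hm))

theorem solution_eq (wl : List String) : solution wl = solution_alt wl := by
  have hempty : ∀ v ∈ (PySem.Dict.empty : PySem.Dict String (List Int)).values, v ≠ [] := by
    intro v hv
    simp [PySem.Dict.values, PySem.Dict.empty] at hv
  have hnd : ((PySem.List.enumerate wl 0).foldl stepB PySem.Dict.empty).keys.Nodup :=
    PySem.Dict.nodup_keys_foldl_modify_key (PySem.List.enumerate wl 0) (fun p => p.2) []
      (fun _ p v => v ++ [p.1]) PySem.Dict.empty (by simp [PySem.Dict.keys_empty])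
  have h1 : solution wl
      = finalA (((PySem.List.enumerate wl 0).foldl stepA
          (mapVal PySem.Dict.empty lastD,
           mapVal (PySem.Dict.empty : PySem.Dict String (List Int)) gapsOpt)).2) := rfl
  have h2 : solution_alt wl
      = ((PySem.List.enumerate wl 0).foldl stepB PySem.Dict.empty).items.filterMap bFun := rfl
  rw [h1, loop_sim _ _ hempty, h2]
  exact final_eq _ hnd

-- ===== VERDICT (by name: the statement is the Claim_ definition above) =====
theorem solution_spec : Claim_equal_solution := by
  intro wl _
  exact solution_eq wl
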